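-- pv_equiv track=rewrite | github.com/mark-akturatech/c64-ai-training | scripts/find_boundaries.py | find_blank_clusters
-- ===== SOURCE A (Python) =====
-- def find_blank_clusters(lines, start, end, min_gap=2):
--     """Find clusters of blank lines that might indicate section breaks."""
--     clusters = []
--     blank_start = None
--     blank_count = 0
--
--     for i in range(start - 1, min(end, len(lines))):
--         line = lines[i].strip()
--         if not line:
--             if blank_start is None:
--                 blank_start = i + 1
--             blank_count += 1
--         else:
--             if blank_count >= min_gap:
--                 clusters.append((blank_start, blank_count))
--             blank_start = None
--             blank_count = 0
--
--     if blank_count >= min_gap: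
--         clusters.append((blank_start, blank_count))
--
--     return clusters
-- ===== SOURCE B (Python) =====
-- def find_blank_clusters(lines, start, end, min_gap=2):
--     """Find clusters of blank lines that might indicate section breaks."""
--     clusters = []
--     hi = min(end, len(lines))
--     i = start - 1
--     while i < hi:
--         if not lines[i].strip():
--             j = i
--             while j < hi and not lines[j].strip():
--                 j += 1
--             if j - i >= min_gap:
--                 clusters.append((i + 1, j - i))
--             i = j
--         else:
--             i += 1
--     return clusters
-- ===== Notes on version B (the rewrite author's own statement) =====
-- stated objective: alternative
-- what changed: Replaces A's single accumulator/sentinel pass (blank_start/blank_count state plus a trailing flush) with a two-pointer run-skipping scan that, on meeting a blank line, advances an inner pointer to the end of the whole blank run and emits the cluster at once, so no cross-iteration state or final flush exists.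
-- outside the precondition, e.g. on find_blank_clusters([], 1, 0, 0): A returns [(None, 0)], B returns []
import Mathlib
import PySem

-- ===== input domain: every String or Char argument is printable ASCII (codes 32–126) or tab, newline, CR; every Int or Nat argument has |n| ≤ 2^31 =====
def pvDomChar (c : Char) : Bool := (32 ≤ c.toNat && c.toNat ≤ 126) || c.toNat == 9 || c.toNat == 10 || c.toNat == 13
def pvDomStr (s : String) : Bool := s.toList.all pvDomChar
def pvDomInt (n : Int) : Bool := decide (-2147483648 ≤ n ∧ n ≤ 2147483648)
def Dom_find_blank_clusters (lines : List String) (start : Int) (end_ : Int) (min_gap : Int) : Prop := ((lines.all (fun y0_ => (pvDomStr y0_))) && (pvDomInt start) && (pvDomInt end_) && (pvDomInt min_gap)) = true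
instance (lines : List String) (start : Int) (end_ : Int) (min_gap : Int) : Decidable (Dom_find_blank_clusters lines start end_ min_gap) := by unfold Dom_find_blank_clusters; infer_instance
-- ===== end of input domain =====

-- B replaces A's accumulator/sentinel pass (blank_start/blank_count state + trailing flush) with a
-- two-pointer run-skipping scan that consumes each blank run at once; same O(n) cost (objective: alternative).

-- `not lines[i].strip()` — the blankness test both Pythons perform (pyGet? = Python indexing incl.
-- negative wraparound; the `getD ""` branch is reached only where Python raises IndexError, outside Pre_).
def pvBlank (lines : List String) (i : Int) : Bool :=
  PySem.Str.strip ((PySem.List.pyGet? lines i).getD "") == ""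

-- ===== PORT A =====
-- the loop body of A (one step of the for-loop, on state (clusters, blank_start, blank_count))
def pvStepA (lines : List String) (min_gap : Int)
    (st : List (Int × Int) × Option Int × Int) (i : Int) : List (Int × Int) × Option Int × Int :=
  if pvBlank lines i then
    (st.1, (if st.2.1 = none then some (i + 1) else st.2.1), st.2.2 + 1)
  else
    ((if min_gap ≤ st.2.2 then st.1 ++ [(st.2.1.getD 0, st.2.2)] else st.1), none, 0)

-- the trailing `if blank_count >= min_gap: clusters.append(...)`
def pvFlushA (min_gap : Int) (st : List (Int × Int) × Option Int × Int) : List (Int × Int) :=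
  if min_gap ≤ st.2.2 then st.1 ++ [(st.2.1.getD 0, st.2.2)] else st.1

def find_blank_clusters (lines : List String) (start : Int) (end_ : Int) (min_gap : Int) : List (Int × Int) :=
  pvFlushA min_gap
    ((PySem.List.pyRange (start - 1) (min end_ (lines.length : Int)) 1).foldl
      (pvStepA lines min_gap) ([], none, 0))

-- ===== PORT B =====
-- inner `while j < hi and not lines[j].strip(): j += 1` of Source B
def pvRunEnd (lines : List String) (hi : Int) (j : Int) : Int :=
  if h : j < hi ∧ pvBlank lines j then pvRunEnd lines hi (j + 1) else j
termination_by (hi - j).toNat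
decreasing_by omega

theorem pvRunEnd_ge (lines : List String) (hi j : Int) : j ≤ pvRunEnd lines hi j := by
  induction j using pvRunEnd.induct lines hi with
  | case1 j h ih => rw [pvRunEnd]; simp [h]; omega
  | case2 j h => rw [pvRunEnd]; simp [h]

-- outer while-loop of Source B
def pvAltLoop (lines : List String) (hi : Int) (min_gap : Int) (i : Int) (acc : List (Int × Int)) : List (Int × Int) :=
  if h : i < hi then
    if hb : pvBlank lines i then
      let j := pvRunEnd lines hi i
      pvAltLoop lines hi min_gap j (if min_gap ≤ j - i then acc ++ [(i + 1, j - i)] else acc)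
    else
      pvAltLoop lines hi min_gap (i + 1) acc
  else acc
termination_by (hi - i).toNat
decreasing_by
  · have h1 : i + 1 ≤ pvRunEnd lines hi i := by
      rw [pvRunEnd]; simp only [h, hb, and_self, dite_true]
      exact pvRunEnd_ge lines hi (i + 1)
    omega
  · omega

def find_blank_clusters_alt (lines : List String) (start : Int) (end_ : Int) (min_gap : Int) : List (Int × Int) :=
  pvAltLoop lines (min end_ (lines.length : Int)) min_gap (start - 1) []

-- ===== PRECONDITION & SPEC =====
-- Pre_ excludes (a) min_gap ≤ 0, where A appends (None, 0) pairs — not values of the declared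
-- List (Int × Int) type — and (b) a loop start below -len(lines) with a nonempty range, where A
-- raises IndexError on the first lines[i].
def Pre_find_blank_clusters (lines : List String) (start : Int) (end_ : Int) (min_gap : Int) : Prop :=
  1 ≤ min_gap ∧ (start - 1 < min end_ (lines.length : Int) → -(lines.length : Int) ≤ start - 1)
instance (lines : List String) (start : Int) (end_ : Int) (min_gap : Int) : Decidable (Pre_find_blank_clusters lines start end_ min_gap) := by unfold Pre_find_blank_clusters; infer_instance

def pvWitness_find_blank_clusters : List String × Int × Int × Int := (["a", "", " ", "b"], 1, 4, 2)

def Spec_find_blank_clusters (lines : List String) (start : Int) (end_ : Int) (min_gap : Int) (out : List (Int × Int)) : Prop := out = find_blank_clusters_alt lines start end_ min_gap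
instance (lines : List String) (start : Int) (end_ : Int) (min_gap : Int) (out : List (Int × Int)) : Decidable (Spec_find_blank_clusters lines start end_ min_gap out) := by unfold Spec_find_blank_clusters; infer_instance

-- ===== CLAIM (what is proved, stated in full; the proofs are below) =====
def Claim_equal_find_blank_clusters : Prop := ∀ (lines : List String) (start : Int) (end_ : Int) (min_gap : Int), Dom_find_blank_clusters lines start end_ min_gap → Pre_find_blank_clusters lines start end_ min_gap → Spec_find_blank_clusters lines start end_ min_gap (find_blank_clusters lines start end_ min_gap)

-- ===== LEMMAS AND PROOFS =====

theorem pvRange_nil {a b : Int} (h : b ≤ a) : PySem.List.pyRange a b 1 = [] := by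
  simp [PySem.List.pyRange]; omega

theorem pvRunEnd_stop (lines : List String) (hi j : Int) (h : ¬ (j < hi ∧ pvBlank lines j)) :
    pvRunEnd lines hi j = j := by
  rw [pvRunEnd]; simp [h]

theorem pvRunEnd_step (lines : List String) (hi j : Int) (h : j < hi) (hb : pvBlank lines j) :
    pvRunEnd lines hi j = pvRunEnd lines hi (j + 1) := by
  rw [pvRunEnd]; simp [h, hb]

theorem pvRunEnd_le (lines : List String) (hi j : Int) (h : j ≤ hi) : pvRunEnd lines hi j ≤ hi := by
  induction j using pvRunEnd.induct lines hi with
  | case1 j hc ih => rw [pvRunEnd]; simp only [hc]; exact ih (by omega)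
  | case2 j hc => rw [pvRunEnd]; simp [hc]; omega

theorem pvRunEnd_not_blank (lines : List String) (hi j : Int)
    (h : pvRunEnd lines hi j < hi) : pvBlank lines (pvRunEnd lines hi j) = false := by
  induction j using pvRunEnd.induct lines hi with
  | case1 j hc ih =>
      rw [pvRunEnd] at h ⊢; simp only [hc] at h ⊢; exact ih h
  | case2 j hc =>
      rw [pvRunEnd] at h ⊢; simp only [hc, dite_false] at h ⊢
      by_cases hb : pvBlank lines j = false
      · exact hb
      · exact absurd ⟨h, by simpa using hb⟩ hc

-- A's fold over a whole blank run: the in-run state (acc, some s, bc) just accumulates the count.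
theorem pvRunLemma (lines : List String) (hi g : Int) :
    ∀ (n : Nat) (lo : Int), (hi - lo).toNat ≤ n →
    ∀ (s bc : Int) (acc : List (Int × Int)),
    (PySem.List.pyRange lo hi 1).foldl (pvStepA lines g) (acc, some s, bc)
      = (PySem.List.pyRange (pvRunEnd lines hi lo) hi 1).foldl (pvStepA lines g)
          (acc, some s, bc + (pvRunEnd lines hi lo - lo)) := by
  intro n
  induction n with
  | zero =>
      intro lo hn s bc acc
      have hle : hi ≤ lo := by omega
      rw [pvRunEnd_stop lines hi lo (by omega)]
      simp
  | succ n ih =>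
      intro lo hn s bc acc
      by_cases hlt : lo < hi
      · by_cases hb : pvBlank lines lo
        · rw [PySem.List.pyRange_one_cons hlt]
          have hstep : pvStepA lines g (acc, some s, bc) lo = (acc, some s, bc + 1) := by
            simp [pvStepA, hb]
          rw [List.foldl_cons, hstep, ih (lo + 1) (by omega) s (bc + 1) acc,
            ← pvRunEnd_step lines hi lo hlt hb]
          have : bc + 1 + (pvRunEnd lines hi lo - (lo + 1)) = bc + (pvRunEnd lines hi lo - lo) := by
            omega
          rw [this]
        · rw [pvRunEnd_stop lines hi lo (by simp [hb])]
          simp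
      · rw [pvRunEnd_stop lines hi lo (by omega)]
        simp

-- main invariant: from an out-of-run state, A's fold + flush equals B's run-skipping loop.
theorem pvMainLemma (lines : List String) (hi g : Int) (hg : 1 ≤ g) :
    ∀ (n : Nat) (lo : Int), (hi - lo).toNat ≤ n → ∀ (acc : List (Int × Int)),
    pvFlushA g ((PySem.List.pyRange lo hi 1).foldl (pvStepA lines g) (acc, none, 0))
      = pvAltLoop lines hi g lo acc := by
  intro n
  induction n with
  | zero =>
      intro lo hn acc
      have hle : hi ≤ lo := by omega
      rw [pvRange_nil hle, pvAltLoop]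
      simp [pvFlushA, show ¬ g ≤ (0:Int) by omega, show ¬ lo < hi by omega]
  | succ n ih =>
      intro lo hn acc
      by_cases hlt : lo < hi
      · by_cases hb : pvBlank lines lo
        · -- blank: first step opens the run, pvRunLemma consumes it
          rw [PySem.List.pyRange_one_cons hlt, List.foldl_cons]
          have hstep : pvStepA lines g (acc, none, 0) lo = (acc, some (lo + 1), 1) := by
            simp [pvStepA, hb]
          rw [hstep,
            pvRunLemma lines hi g ((hi - (lo + 1)).toNat) (lo + 1) (le_refl _) (lo + 1) 1 acc,
            ← pvRunEnd_step lines hi lo hlt hb]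
          set e := pvRunEnd lines hi lo with he
          have hge : lo + 1 ≤ e := by
            rw [he, pvRunEnd_step lines hi lo hlt hb]; exact pvRunEnd_ge lines hi (lo + 1)
          have hle : e ≤ hi := pvRunEnd_le lines hi lo (by omega)
          have harith : 1 + (e - (lo + 1)) = e - lo := by omega
          rw [harith]
          rw [pvAltLoop]
          simp only [hlt, hb, dite_true, ← he]
          by_cases hehi : e < hi
          · -- run ends before hi at a nonblank line: A flushes at e, B recurses from e+1
            have hnb : pvBlank lines e = false := he ▸ pvRunEnd_not_blank lines hi lo hehi
            rw [PySem.List.pyRange_one_cons hehi, List.foldl_cons]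
            have hstep2 : pvStepA lines g (acc, some (lo + 1), e - lo) e
                = ((if g ≤ e - lo then acc ++ [(lo + 1, e - lo)] else acc), none, 0) := by
              simp [pvStepA, hnb]
            rw [hstep2, ih (e + 1) (by omega)]
            conv_rhs => rw [pvAltLoop]
            simp [hehi, hnb]
          · -- run reaches hi: A's trailing flush emits the cluster, B's loop stops
            have hehi' : e = hi := by omega
            rw [hehi', pvRange_nil (le_refl hi)]
            rw [pvAltLoop]
            simp only [List.foldl_nil, lt_irrefl, dite_false]
            simp [pvFlushA]
        · -- nonblank, no run open: state stays (acc, none, 0) since 1 ≤ g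
          rw [PySem.List.pyRange_one_cons hlt, List.foldl_cons]
          have hstep : pvStepA lines g (acc, none, 0) lo = (acc, none, 0) := by
            simp [pvStepA, hb]; omega
          rw [hstep, ih (lo + 1) (by omega)]
          conv_rhs => rw [pvAltLoop]
          simp [hlt, hb]
      · rw [pvRange_nil (by omega), pvAltLoop]
        simp [pvFlushA, show ¬ g ≤ (0:Int) by omega, show ¬ lo < hi by omega]

-- ===== VERDICT (by name: the statement is the Claim_ definition above) =====
theorem find_blank_clusters_spec : Claim_equal_find_blank_clusters := by
  intro lines start end_ min_gap _ hpre
  unfold Spec_find_blank_clusters find_blank_clusters find_blank_clusters_alt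
  exact pvMainLemma lines (min end_ (lines.length : Int)) min_gap hpre.1
    ((min end_ (lines.length : Int) - (start - 1)).toNat) (start - 1) (le_refl _) []
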